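-- pv_equiv track=rewrite | github.com/MAlshaik/CSE231 | Proj06/proj06.py | get_region_list
-- ===== SOURCE A (Python) =====
-- def get_region_list (master_list):
--     '''Retrieve all regions into a sorted non duplicate list'''
--     sorted_list = []
--     for tup in master_list:
--         if tup[-1] == '': sorted_list.append(None)
--         #if the region index is empty it turns it to None
--         else: sorted_list.append(tup[-1])
--
--     sorted_list = set(sorted_list)
--
--     if None in sorted_list:
--         sorted_list.remove(None)
--         #removes none so that it does not raise a type error when sorting
--         sorted_list = sorted(sorted_list)
--     else:
--         sorted_list = sorted(sorted_list)
--
--     return sorted_list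
-- ===== SOURCE B (Python) =====
-- def get_region_list(master_list):
--     '''Retrieve all regions into a sorted non duplicate list'''
--     vals = sorted([tup[-1] for tup in master_list if tup[-1] != ''])
--     result = []
--     for v in vals:
--         if result[-1:] != [v]:
--             result.append(v)
--     return result
-- ===== Notes on version B (the rewrite author's own statement) =====
-- stated objective: idiomatic
-- what changed: Replaces the None-sentinel + hash-set dedup + membership-guarded remove with filtering empties up front, sorting once, and deduplicating by comparing each element to the last one appended (sort-then-adjacent-dedupe).
import Mathlib
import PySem

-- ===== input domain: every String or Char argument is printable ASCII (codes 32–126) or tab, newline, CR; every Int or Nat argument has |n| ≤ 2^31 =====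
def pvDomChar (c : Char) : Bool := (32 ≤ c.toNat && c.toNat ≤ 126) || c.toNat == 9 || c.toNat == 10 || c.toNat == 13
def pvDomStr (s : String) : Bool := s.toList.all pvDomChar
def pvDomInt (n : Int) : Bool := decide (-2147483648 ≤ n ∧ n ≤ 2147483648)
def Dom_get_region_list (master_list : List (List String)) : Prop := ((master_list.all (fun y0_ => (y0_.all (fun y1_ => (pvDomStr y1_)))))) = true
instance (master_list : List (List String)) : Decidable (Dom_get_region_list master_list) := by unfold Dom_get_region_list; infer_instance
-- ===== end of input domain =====

-- B replaces A's None-sentinel + set-dedup + remove with filter, sort once, adjacent dedupe;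
-- same O(n log n) cost, simpler single pass after the sort.

-- ===== PORT A =====
-- tup[-1] is ported as pyGetD tup (-1) ""; exact under Pre_ (every inner list nonempty,
-- since Python raises IndexError on tup[-1] for an empty tuple).
-- The final sorted() of a set known to contain no None is ported as filterMap id (exact:
-- the list holds only `some` values there) followed by PySem.List.sorted.
def get_region_list (master_list : List (List String)) : List String :=
  let sorted_list : List (Option String) :=
    master_list.foldl (fun acc tup =>
      if PySem.List.pyGetD tup (-1) "" = "" then acc ++ [(none : Option String)]
      else acc ++ [some (PySem.List.pyGetD tup (-1) "")]) []
  let s : PySem.Set (Option String) := PySem.Set.ofList sorted_list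
  if PySem.Set.contains s (none : Option String) then
    -- guarded remove: exact as Set.discard since membership was just checked
    let s2 := PySem.Set.discard s (none : Option String)
    PySem.List.sorted (s2.filterMap id) (fun x => x) false
  else
    PySem.List.sorted (s.filterMap id) (fun x => x) false

-- ===== PORT B =====
def get_region_list_alt (master_list : List (List String)) : List String :=
  let vals : List String :=
    PySem.List.sorted
      (master_list.filterMap (fun tup =>
        if PySem.List.pyGetD tup (-1) "" ≠ "" then some (PySem.List.pyGetD tup (-1) "") else none))
      (fun x => x) false
  vals.foldl (fun result v => if result.getLast? = some v then result else result ++ [v]) []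

-- ===== PRECONDITION & SPEC =====
-- Pre_ excludes exactly the inputs containing an empty inner list, on which A's tup[-1] raises IndexError.
def Pre_get_region_list (master_list : List (List String)) : Prop :=
  ∀ tup ∈ master_list, tup ≠ []
instance (master_list : List (List String)) : Decidable (Pre_get_region_list master_list) := by
  unfold Pre_get_region_list; infer_instance
def pvWitness_get_region_list : List (List String) := [["x", "b"], ["", ""], ["a"], ["z", "b"]]

def Spec_get_region_list (master_list : List (List String)) (out : List String) : Prop := out = get_region_list_alt master_list
instance (master_list : List (List String)) (out : List String) : Decidable (Spec_get_region_list master_list out) := by unfold Spec_get_region_list; infer_instance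

-- ===== CLAIM (what is proved, stated in full; the proofs are below) =====
def Claim_equal_get_region_list : Prop := ∀ (master_list : List (List String)), Dom_get_region_list master_list → Pre_get_region_list master_list → Spec_get_region_list master_list (get_region_list master_list)

-- ===== LEMMAS AND PROOFS =====

-- every element of a strictly increasing list is ≤ its last element
theorem pv_le_getLast {α : Type} [LinearOrder α] {acc : List α} {l : α}
    (hp : acc.Pairwise (· < ·)) (hl : acc.getLast? = some l) : ∀ a ∈ acc, a ≤ l := by
  induction acc with
  | nil => simp at hl
  | cons x xs ih =>
    intro a ha
    cases xs with
    | nil =>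
      simp at hl ha; simp [ha, hl]
    | cons y ys =>
      rw [List.getLast?_cons_cons] at hl
      rcases List.mem_cons.mp ha with rfl | ha'
      · have hx : a < y := (List.pairwise_cons.mp hp).1 y (by simp)
        have := ih (List.pairwise_cons.mp hp).2 hl y (by simp)
        exact le_trans (le_of_lt hx) this
      · exact ih (List.pairwise_cons.mp hp).2 hl a ha'

-- invariant for B's dedupe loop: on a ≤-sorted input, starting from a strictly increasing
-- accumulator whose elements are ≤ everything still to come, the loop keeps strict
-- increasingness and the members are exactly acc's plus the input's
theorem pv_dedupe_invariant {α : Type} [LinearOrder α] [DecidableEq α] :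
    ∀ (ls acc : List α), ls.Pairwise (· ≤ ·) → acc.Pairwise (· < ·) →
    (∀ b ∈ ls, ∀ a ∈ acc, a ≤ b) →
    (ls.foldl (fun result v => if result.getLast? = some v then result else result ++ [v]) acc).Pairwise (· < ·) ∧
    (∀ x, x ∈ ls.foldl (fun result v => if result.getLast? = some v then result else result ++ [v]) acc ↔ x ∈ acc ∨ x ∈ ls) := by
  intro ls
  induction ls with
  | nil => intro acc _ hacc _; simp [hacc]
  | cons v rest ih =>
    intro acc hs hacc hle
    have hs' := (List.pairwise_cons.mp hs).2
    have hvle := (List.pairwise_cons.mp hs).1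
    by_cases hlast : acc.getLast? = some v
    · have hvmem : v ∈ acc := List.mem_of_getLast? hlast
      have h := ih acc hs' hacc (fun b hb a ha => hle b (by simp [hb]) a ha)
      simp only [List.foldl_cons, if_pos hlast]
      refine ⟨h.1, fun x => ?_⟩
      rw [h.2]
      simp only [List.mem_cons]
      constructor
      · rintro (hx | hx) <;> tauto
      · rintro (hx | rfl | hx) <;> tauto
    · -- append v
      have hacc' : (acc ++ [v]).Pairwise (· < ·) := by
        rw [List.pairwise_append]
        refine ⟨hacc, by simp, ?_⟩
        intro a ha b hb
        simp at hb; subst hb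
        have hav : a ≤ b := hle b (by simp) a ha
        rcases lt_or_eq_of_le hav with h | rfl
        · exact h
        · -- a = v ∈ acc; then getLast of acc is ≥ a = v but also ≤ v, so = v, contradiction
          exfalso
          cases hg : acc.getLast? with
          | none => simp [List.getLast?_eq_none_iff] at hg; simp [hg] at ha
          | some l =>
            have h1 : a ≤ l := pv_le_getLast hacc hg a ha
            have h2 : l ≤ a := hle a (by simp) l (List.mem_of_getLast? hg)
            have : l = a := le_antisymm h2 h1
            exact hlast (by rw [hg, this])
      have hle' : ∀ b ∈ rest, ∀ a ∈ acc ++ [v], a ≤ b := by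
        intro b hb a ha
        rcases List.mem_append.mp ha with ha' | ha'
        · exact hle b (by simp [hb]) a ha'
        · simp at ha'; subst ha'; exact hvle b hb
      have h := ih (acc ++ [v]) hs' hacc' hle'
      simp only [List.foldl_cons, if_neg hlast]
      refine ⟨h.1, fun x => ?_⟩
      rw [h.2]
      simp only [List.mem_append, List.mem_cons]
      tauto

-- the value of a tuple's last element as both ports compute it
-- (abbreviation used only in the proofs)
def pvLastD (tup : List String) : String := PySem.List.pyGetD tup (-1) ""

theorem pv_A_list_eq (master_list : List (List String)) :
    master_list.foldl (fun acc tup =>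
      if PySem.List.pyGetD tup (-1) "" = "" then acc ++ [(none : Option String)]
      else acc ++ [some (PySem.List.pyGetD tup (-1) "")]) [] =
    master_list.map (fun tup => if pvLastD tup = "" then none else some (pvLastD tup)) := by
  have : ∀ (ml : List (List String)) (acc : List (Option String)),
      ml.foldl (fun acc tup =>
        if PySem.List.pyGetD tup (-1) "" = "" then acc ++ [(none : Option String)]
        else acc ++ [some (PySem.List.pyGetD tup (-1) "")]) acc =
      acc ++ ml.map (fun tup => if pvLastD tup = "" then none else some (pvLastD tup)) := by
    intro ml
    induction ml with
    | nil => simp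
    | cons t ts ih =>
      intro acc
      have hfun : ∀ a : List String,
          (if pvLastD a = "" then (none : Option String) else some (pvLastD a)) =
          if PySem.List.pyGetD a (-1) "" = "" then none else some (PySem.List.pyGetD a (-1) "") := by
        intro a; simp [pvLastD]
      by_cases h : pvLastD t = ""
      · unfold pvLastD at h
        simp only [List.foldl_cons, List.map_cons, if_pos h, hfun, ih, List.append_assoc,
          List.singleton_append]
      · unfold pvLastD at h
        simp only [List.foldl_cons, List.map_cons, if_neg h, hfun, ih, List.append_assoc,
          List.singleton_append]
  simpa using this master_list []

-- membership in A's deduped option list, after dropping none and unwrapping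
theorem pv_mem_S (master_list : List (List String)) (x : String) :
    (x ∈ master_list.filterMap (fun tup =>
        if PySem.List.pyGetD tup (-1) "" ≠ "" then some (PySem.List.pyGetD tup (-1) "") else none)) ↔
    ∃ tup ∈ master_list, pvLastD tup ≠ "" ∧ pvLastD tup = x := by
  simp only [List.mem_filterMap, pvLastD]
  constructor
  · rintro ⟨tup, htup, hx⟩
    by_cases h : PySem.List.pyGetD tup (-1) "" ≠ "" <;> simp [h] at hx
    · exact ⟨tup, htup, h, hx⟩
  · rintro ⟨tup, htup, h1, h2⟩
    subst h2
    exact ⟨tup, htup, by simp [h1]⟩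

-- ===== VERDICT (by name: the statement is the Claim_ definition above) =====
theorem get_region_list_spec : Claim_equal_get_region_list := by
  intro master_list _ _
  unfold Spec_get_region_list get_region_list get_region_list_alt
  simp only []
  set S : List String := master_list.filterMap (fun tup =>
      if PySem.List.pyGetD tup (-1) "" ≠ "" then some (PySem.List.pyGetD tup (-1) "") else none) with hS
  set L : List (Option String) := master_list.map
      (fun tup => if pvLastD tup = "" then none else some (pvLastD tup)) with hL
  rw [pv_A_list_eq]
  -- B's result
  set vals := PySem.List.sorted S (fun x => x) false with hvals
  set B := vals.foldl (fun result v => if result.getLast? = some v then result else result ++ [v]) [] with hB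
  have hvs : vals.Pairwise (· ≤ ·) := PySem.List.sorted_pairwise S (fun x => x) -- key = id
  have hinv := pv_dedupe_invariant vals [] hvs (by simp) (by simp)
  have hBlt : B.Pairwise (· < ·) := hinv.1
  have hBmem : ∀ x, x ∈ B ↔ x ∈ S := by
    intro x
    rw [hB, (hinv.2 x)]
    simp [hvals, PySem.List.mem_sorted]
  have hBnd : B.Nodup := hBlt.imp ne_of_lt
  -- A's set, in both branches, filterMapped
  have hmemD : ∀ (s : List (Option String)) (x : String),
      x ∈ s.filterMap id ↔ some x ∈ s := by
    intro s x; simp [List.mem_filterMap]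
  have hmemL : ∀ x : String, (some x ∈ L) ↔ x ∈ S := by
    intro x
    rw [hL, hS, pv_mem_S]
    simp only [List.mem_map]
    constructor
    · rintro ⟨tup, htup, hx⟩
      by_cases h : pvLastD tup = "" <;> simp [h] at hx
      · exact ⟨tup, htup, h, hx⟩
    · rintro ⟨tup, htup, h1, h2⟩
      subst h2
      exact ⟨tup, htup, by simp [h1]⟩
  have hndD : ∀ (s : List (Option String)), s.Nodup → (s.filterMap id).Nodup := by
    intro s hnd
    exact List.Nodup.filterMap (fun a a' b hb hb' => by
      cases a <;> cases a' <;> simp_all) hnd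
  have key : ∀ (s : List (Option String)), s.Nodup →
      (∀ x : String, (some x ∈ s) ↔ x ∈ S) →
      PySem.List.sorted (s.filterMap id) (fun x => x) false = B := by
    intro s hnd hmem
    apply PySem.List.sorted_eq_of_perm_of_pairwise_lt
    · rw [List.perm_ext_iff_of_nodup hBnd (hndD s hnd)]
      intro x
      rw [hBmem x, hmemD s x, hmem x]
    · exact hBlt
  by_cases hc : PySem.Set.contains (PySem.Set.ofList L) (none : Option String)
  · rw [if_pos hc]
    apply key
    · exact PySem.Set.nodup_discard _ _ (PySem.Set.nodup_ofList L)
    · intro x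
      rw [PySem.Set.mem_discard]
      constructor
      · rintro ⟨h1, _⟩
        exact (hmemL x).mp ((PySem.Set.mem_ofList L (some x)).mp h1)
      · intro h
        exact ⟨(PySem.Set.mem_ofList L (some x)).mpr ((hmemL x).mpr h), by simp⟩
  · rw [if_neg hc]
    apply key
    · exact PySem.Set.nodup_ofList L
    · intro x
      rw [PySem.Set.mem_ofList L (some x)]
      exact hmemL x
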